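-- pv_equiv track=rewrite | github.com/hms4792/vietnam-infra-news | scripts/build_dashboard.py | _plan_to_sector
-- ===== SOURCE A (Python) =====
-- def _plan_to_sector(plan: str) -> str:
--     """Plan ID → Sector 추론 (fallback용)"""
--     p = plan.upper()
--     if 'WW' in p:                              return 'Waste Water'
--     if 'SWM' in p or 'SOLID' in p:            return 'Solid Waste'
--     if 'WAT' in p:                             return 'Water Supply/Drainage'
--     if any(x in p for x in ('PDP8','RENEW','LNG','NUCLEAR','PWR')):
--                                                return 'Power'
--     if 'OG' in p or 'OIL' in p:              return 'Oil & Gas'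
--     if 'IP' in p or 'INDUST' in p or 'ENV' in p:
--                                                return 'Industrial Parks'
--     if any(x in p for x in ('SC','SMART','METRO','TRAN','URB','EV','MEKONG','HN')):
--                                                return 'Transport'
--     return 'Environment'
-- ===== SOURCE B (Python) =====
-- # Single pass over the text: collect every window of 2..7 characters into a set,
-- # then pick the first rule whose keyword set intersects the collected windows.
-- _RULES = [
--     (('WW',), 'Waste Water'),
--     (('SWM', 'SOLID'), 'Solid Waste'),
--     (('WAT',), 'Water Supply/Drainage'),
--     (('PDP8', 'RENEW', 'LNG', 'NUCLEAR', 'PWR'), 'Power'),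
--     (('OG', 'OIL'), 'Oil & Gas'),
--     (('IP', 'INDUST', 'ENV'), 'Industrial Parks'),
--     (('SC', 'SMART', 'METRO', 'TRAN', 'URB', 'EV', 'MEKONG', 'HN'), 'Transport'),
-- ]
--
--
-- def _plan_to_sector(plan: str) -> str:
--     p = plan.upper()
--     windows = set()
--     for i in range(len(p)):
--         for L in range(2, 8):          # every keyword is 2..7 chars long
--             windows.add(p[i:i + L])
--     for keys, label in _RULES:
--         if not windows.isdisjoint(keys):
--             return label
--     return 'Environment'
-- ===== Notes on version B (the rewrite author's own statement) =====
-- stated objective: alternative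
-- what changed: Instead of running a separate substring search for each of the 22 keywords, B makes a single pass over the upper-cased text collecting every 2-7 character window into a set, then returns the label of the first rule whose keyword tuple intersects that set.
import Mathlib
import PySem

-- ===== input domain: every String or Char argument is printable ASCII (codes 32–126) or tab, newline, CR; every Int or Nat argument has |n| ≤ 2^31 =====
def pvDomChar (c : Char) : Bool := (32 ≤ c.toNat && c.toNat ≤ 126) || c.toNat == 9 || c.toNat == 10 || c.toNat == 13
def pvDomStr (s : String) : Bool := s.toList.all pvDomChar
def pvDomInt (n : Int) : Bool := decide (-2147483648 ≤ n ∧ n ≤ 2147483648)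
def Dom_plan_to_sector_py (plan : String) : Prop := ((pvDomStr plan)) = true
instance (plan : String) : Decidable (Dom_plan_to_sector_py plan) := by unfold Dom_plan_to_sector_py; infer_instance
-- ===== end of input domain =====

-- B replaces A's per-keyword substring searches by a single pass over the text that collects
-- every 2..7-character window into a set, followed by a first-intersecting-rule selection
-- (alternative algorithm; no speed claim).

-- ===== PORT A =====
def plan_to_sector_py (plan : String) : String :=
  let p := PySem.Str.upper plan
  if PySem.Str.isIn "WW" p then "Waste Water"
  else if PySem.Str.isIn "SWM" p || PySem.Str.isIn "SOLID" p then "Solid Waste"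
  else if PySem.Str.isIn "WAT" p then "Water Supply/Drainage"
  else if ["PDP8", "RENEW", "LNG", "NUCLEAR", "PWR"].any (fun x => PySem.Str.isIn x p) then "Power"
  else if PySem.Str.isIn "OG" p || PySem.Str.isIn "OIL" p then "Oil & Gas"
  else if PySem.Str.isIn "IP" p || PySem.Str.isIn "INDUST" p || PySem.Str.isIn "ENV" p then "Industrial Parks"
  else if ["SC", "SMART", "METRO", "TRAN", "URB", "EV", "MEKONG", "HN"].any (fun x => PySem.Str.isIn x p) then "Transport"
  else "Environment"

-- ===== PORT B =====
def pvRules : List (List String × String) :=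
  [ (["WW"], "Waste Water")
  , (["SWM", "SOLID"], "Solid Waste")
  , (["WAT"], "Water Supply/Drainage")
  , (["PDP8", "RENEW", "LNG", "NUCLEAR", "PWR"], "Power")
  , (["OG", "OIL"], "Oil & Gas")
  , (["IP", "INDUST", "ENV"], "Industrial Parks")
  , (["SC", "SMART", "METRO", "TRAN", "URB", "EV", "MEKONG", "HN"], "Transport") ]

-- windows: the set of all slices p[i:i+L], 0 ≤ i < len(p), 2 ≤ L < 8 (Source B's double loop)
def pvWindows (p : String) : PySem.Set String :=
  (PySem.List.pyRange 0 (PySem.Str.len p) 1).foldl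
    (fun w i =>
      (PySem.List.pyRange 2 8 1).foldl
        (fun w L => PySem.Set.add w (PySem.Str.slice p (some i) (some (i + L)))) w)
    PySem.Set.empty

-- Source B's rule loop; 'not windows.isdisjoint(keys)' = some key of the rule is in the set
def pvSelect (w : PySem.Set String) : List (List String × String) → String
  | [] => "Environment"
  | (keys, label) :: rest =>
      if keys.any (fun k => PySem.Set.contains w k) then label else pvSelect w rest

def plan_to_sector_py_alt (plan : String) : String :=
  let p := PySem.Str.upper plan
  pvSelect (pvWindows p) pvRules

-- ===== PRECONDITION & SPEC =====
def Spec_plan_to_sector_py (plan : String) (out : String) : Prop := out = plan_to_sector_py_alt plan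
instance (plan : String) (out : String) : Decidable (Spec_plan_to_sector_py plan out) := by unfold Spec_plan_to_sector_py; infer_instance

-- ===== CLAIM (what is proved, stated in full; the proofs are below) =====
def Claim_equal_plan_to_sector_py : Prop := ∀ (plan : String), Dom_plan_to_sector_py plan → Spec_plan_to_sector_py plan (plan_to_sector_py plan)

-- ===== LEMMAS AND PROOFS =====

-- membership in a foldl that only grows the set by elements satisfying P
theorem pv_mem_foldl {α β : Type} [BEq β] [LawfulBEq β] (P : α → β → Prop)
    (g : PySem.Set β → α → PySem.Set β)
    (hg : ∀ w a x, x ∈ g w a ↔ x ∈ w ∨ P a x)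
    (l : List α) (s : PySem.Set β) (x : β) :
    x ∈ l.foldl g s ↔ x ∈ s ∨ ∃ a ∈ l, P a x := by
  induction l generalizing s with
  | nil => simp
  | cons a l ih => simp [List.foldl, ih, hg]; tauto

theorem pv_mem_pvWindows (p x : String) :
    x ∈ pvWindows p ↔ ∃ i ∈ PySem.List.pyRange 0 (PySem.Str.len p) 1,
      ∃ L ∈ PySem.List.pyRange 2 8 1, x = PySem.Str.slice p (some i) (some (i + L)) := by
  unfold pvWindows
  rw [pv_mem_foldl (fun i x => ∃ L ∈ PySem.List.pyRange 2 8 1,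
        x = PySem.Str.slice p (some i) (some (i + L)))
      _ (fun w i x => pv_mem_foldl (fun L x => x = PySem.Str.slice p (some i) (some (i + L)))
        _ (fun w L x => PySem.Set.mem_add w _ x) _ w x)]
  simp [PySem.Set.empty]

-- a 2..7-character keyword is a collected window iff it occurs as a substring
theorem pv_window_iff_isIn (p kw : String) (h2 : 2 ≤ kw.toList.length) (h7 : kw.toList.length ≤ 7) :
    PySem.Set.contains (pvWindows p) kw = PySem.Str.isIn kw p := by
  have hmem : kw ∈ pvWindows p ↔ kw.toList <:+: p.toList := by
    rw [pv_mem_pvWindows]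
    constructor
    · rintro ⟨i, hi, L, hL, hkw⟩
      rw [PySem.List.mem_pyRange_one, PySem.Str.len_eq] at hi
      rw [PySem.List.mem_pyRange_one] at hL
      obtain ⟨a, rfl⟩ : ∃ a : Nat, (a : Int) = i := ⟨i.toNat, by omega⟩
      obtain ⟨b, rfl⟩ : ∃ b : Nat, (b : Int) = L := ⟨L.toNat, by omega⟩
      have hw : kw.toList = List.take b (List.drop a p.toList) := by
        rw [hkw, PySem.Str.toList_slice, PySem.Chars.slice_eq_listSlice,
          show ((a : Int) + (b : Int)) = ((a + b : Nat) : Int) by push_cast; ring,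
          PySem.List.slice_natCast, show a + b - a = b by omega]
      rw [hw]
      exact (List.take_prefix _ _).isInfix.trans (List.drop_suffix _ _).isInfix
    · rintro ⟨s, t, hst⟩
      have hplen : s.length + kw.toList.length + t.length = p.toList.length := by
        have := congrArg List.length hst
        simp only [List.length_append] at this
        omega
      refine ⟨(s.length : Int), ?_, (kw.toList.length : Int), ?_, ?_⟩
      · rw [PySem.List.mem_pyRange_one, PySem.Str.len_eq]
        omega
      · rw [PySem.List.mem_pyRange_one]; omega
      · rw [← String.toList_inj, PySem.Str.toList_slice, PySem.Chars.slice_eq_listSlice,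
          show ((s.length : Int) + (kw.toList.length : Int))
              = ((s.length + kw.toList.length : Nat) : Int) by push_cast; ring,
          PySem.List.slice_natCast,
          show s.length + kw.toList.length - s.length = kw.toList.length by omega,
          ← hst, show s ++ kw.toList ++ t = s ++ (kw.toList ++ t) by simp,
          List.drop_left, List.take_left]
  have hc : PySem.Set.contains (pvWindows p) kw = true ↔ kw ∈ pvWindows p := by
    simp [PySem.Set.contains]
  rcases h : PySem.Str.isIn kw p with _ | _
  · rw [PySem.Str.isIn_eq, PySem.Chars.isIn_eq_false_iff] at h
    simpa [hc, hmem] using h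
  · rw [PySem.Str.isIn_eq, PySem.Chars.isIn_iff_infix] at h
    simpa [hc, hmem] using h

-- ===== VERDICT (by name: the statement is the Claim_ definition above) =====
theorem plan_to_sector_py_spec : Claim_equal_plan_to_sector_py := by
  intro plan _
  unfold Spec_plan_to_sector_py
  simp only [plan_to_sector_py, plan_to_sector_py_alt, pvRules, pvSelect,
    List.any_cons, List.any_nil, Bool.or_false]
  rw [pv_window_iff_isIn _ "WW" (by decide) (by decide),
    pv_window_iff_isIn _ "SWM" (by decide) (by decide),
    pv_window_iff_isIn _ "SOLID" (by decide) (by decide),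
    pv_window_iff_isIn _ "WAT" (by decide) (by decide),
    pv_window_iff_isIn _ "PDP8" (by decide) (by decide),
    pv_window_iff_isIn _ "RENEW" (by decide) (by decide),
    pv_window_iff_isIn _ "LNG" (by decide) (by decide),
    pv_window_iff_isIn _ "NUCLEAR" (by decide) (by decide),
    pv_window_iff_isIn _ "PWR" (by decide) (by decide),
    pv_window_iff_isIn _ "OG" (by decide) (by decide),
    pv_window_iff_isIn _ "OIL" (by decide) (by decide),
    pv_window_iff_isIn _ "IP" (by decide) (by decide),
    pv_window_iff_isIn _ "INDUST" (by decide) (by decide),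
    pv_window_iff_isIn _ "ENV" (by decide) (by decide),
    pv_window_iff_isIn _ "SC" (by decide) (by decide),
    pv_window_iff_isIn _ "SMART" (by decide) (by decide),
    pv_window_iff_isIn _ "METRO" (by decide) (by decide),
    pv_window_iff_isIn _ "TRAN" (by decide) (by decide),
    pv_window_iff_isIn _ "URB" (by decide) (by decide),
    pv_window_iff_isIn _ "EV" (by decide) (by decide),
    pv_window_iff_isIn _ "MEKONG" (by decide) (by decide),
    pv_window_iff_isIn _ "HN" (by decide) (by decide)]
  simp only [Bool.or_assoc]
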